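-- pv_equiv track=rewrite | github.com/enkaoua/calibration_analysis | user_study.py | is_board_inside_rectangle
-- ===== SOURCE A (Python) =====
-- def is_board_inside_rectangle(board_corners, rectangle, tolerance=10):
--     """
--     Check if the outer corners of the detected Charuco board are inside the given rectangle.
--
--     board_corners: Corners of the detected Charuco board.
--     rectangle: Tuple ((x1, y1), (x2, y2)) representing the rectangle's top-left and bottom-right corners.
--     tolerance: (int) A tolerance value to account for slight misalignments.
--
--     Returns: True if all board corners are inside the rectangle (with tolerance), else False.
--     """
--     top_left, bottom_right = rectangle
--     x1, y1 = top_left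
--     x2, y2 = bottom_right
--
--     # Check if each of corners is inside the rectangle, considering tolerance
--     for corner in board_corners:
--         x, y = corner[0][0], corner[0][1]  # Extract x, y coordinates
--         if not (x1 - tolerance <= x <= x2 + tolerance and y1 - tolerance <= y <= y2 + tolerance):
--             return False
--
--     return True
-- ===== SOURCE B (Python) =====
-- def is_board_inside_rectangle(board_corners, rectangle, tolerance=10):
--     """Bounding-box formulation: compare the extremes of the corner cloud
--     against the (tolerance-expanded) rectangle, instead of testing each
--     corner in a loop with an early return."""
--     if not board_corners:
--         return True
--     (x1, y1), (x2, y2) = rectangle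
--     xs = [corner[0][0] for corner in board_corners]
--     ys = [corner[0][1] for corner in board_corners]
--     return (x1 - tolerance <= min(xs) and max(xs) <= x2 + tolerance
--             and y1 - tolerance <= min(ys) and max(ys) <= y2 + tolerance)
-- ===== Notes on version B (the rewrite author's own statement) =====
-- stated objective: alternative
-- what changed: Replaces the per-corner loop with an early return by a bounding-box test: one min/max over the corner x and y coordinates, then a single four-way comparison against the tolerance-expanded rectangle.
-- outside the precondition, e.g. on is_board_inside_rectangle([[[100, 100]], []], ((0, 0), (1, 1)), 0): A returns False, B raises IndexError
import Mathlib
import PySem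

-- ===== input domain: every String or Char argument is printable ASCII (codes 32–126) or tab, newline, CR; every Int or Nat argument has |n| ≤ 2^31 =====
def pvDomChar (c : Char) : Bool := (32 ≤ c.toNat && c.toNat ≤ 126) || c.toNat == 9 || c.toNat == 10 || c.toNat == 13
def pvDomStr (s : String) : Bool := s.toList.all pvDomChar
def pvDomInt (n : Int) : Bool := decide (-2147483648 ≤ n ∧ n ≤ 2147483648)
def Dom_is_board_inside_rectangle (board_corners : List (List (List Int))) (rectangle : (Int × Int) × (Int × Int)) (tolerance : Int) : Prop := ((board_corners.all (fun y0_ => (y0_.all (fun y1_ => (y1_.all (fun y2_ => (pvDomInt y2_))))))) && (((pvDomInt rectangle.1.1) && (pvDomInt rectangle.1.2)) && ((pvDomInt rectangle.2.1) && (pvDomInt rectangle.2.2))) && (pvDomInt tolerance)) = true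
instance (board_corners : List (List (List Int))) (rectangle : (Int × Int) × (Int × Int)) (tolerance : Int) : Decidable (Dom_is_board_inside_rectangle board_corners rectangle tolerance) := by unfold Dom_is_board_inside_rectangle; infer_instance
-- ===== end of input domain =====

-- B replaces A's per-corner loop with a bounding-box test (min/max of the corner
-- coordinates against the tolerance-expanded rectangle); same cost, different shape.

-- ===== PORT A =====
-- the x (j = 0) / y (j = 1) coordinate corner[0][j]; .getD defaults are only
-- reached where Python raises IndexError, which Pre_ excludes
def pvCoord (c : List (List Int)) (j : Int) : Int :=
  (PySem.List.pyGet? ((PySem.List.pyGet? c 0).getD []) j).getD 0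

def pvA_loop (x1 y1 x2 y2 tolerance : Int) : List (List (List Int)) → Bool
  | [] => true
  | corner :: rest =>
    let x := pvCoord corner 0
    let y := pvCoord corner 1
    if x1 - tolerance ≤ x ∧ x ≤ x2 + tolerance ∧ y1 - tolerance ≤ y ∧ y ≤ y2 + tolerance then
      pvA_loop x1 y1 x2 y2 tolerance rest
    else
      false

def is_board_inside_rectangle (board_corners : List (List (List Int))) (rectangle : (Int × Int) × (Int × Int)) (tolerance : Int) : Bool :=
  pvA_loop rectangle.1.1 rectangle.1.2 rectangle.2.1 rectangle.2.2 tolerance board_corners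

-- ===== PORT B =====
-- B's own corner[0][j] accessor (same Python expression transliterated independently)
def pvCoordB (c : List (List Int)) (j : Int) : Int :=
  (PySem.List.pyGet? ((PySem.List.pyGet? c 0).getD []) j).getD 0

def is_board_inside_rectangle_alt (board_corners : List (List (List Int))) (rectangle : (Int × Int) × (Int × Int)) (tolerance : Int) : Bool :=
  if board_corners = [] then true
  else
    let x1 := rectangle.1.1; let y1 := rectangle.1.2
    let x2 := rectangle.2.1; let y2 := rectangle.2.2
    let xs := board_corners.map (fun corner => pvCoordB corner 0)
    let ys := board_corners.map (fun corner => pvCoordB corner 1)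
    decide (x1 - tolerance ≤ (PySem.List.min? xs (fun v => v)).getD 0)
      && decide ((PySem.List.max? xs (fun v => v)).getD 0 ≤ x2 + tolerance)
      && decide (y1 - tolerance ≤ (PySem.List.min? ys (fun v => v)).getD 0)
      && decide ((PySem.List.max? ys (fun v => v)).getD 0 ≤ y2 + tolerance)

-- ===== PRECONDITION & SPEC =====
-- Pre_ excludes inputs containing a malformed corner (corner == [] or corner[0] shorter
-- than 2): there Python A raises IndexError unless an earlier corner already failed the
-- test (in which case A returns False), while B's comprehensions always raise IndexError.
def Pre_is_board_inside_rectangle (board_corners : List (List (List Int))) (rectangle : (Int × Int) × (Int × Int)) (tolerance : Int) : Prop :=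
  ∀ c ∈ board_corners, c ≠ [] ∧ 2 ≤ (c.headD []).length
instance (board_corners : List (List (List Int))) (rectangle : (Int × Int) × (Int × Int)) (tolerance : Int) : Decidable (Pre_is_board_inside_rectangle board_corners rectangle tolerance) := by unfold Pre_is_board_inside_rectangle; infer_instance

def pvWitness_is_board_inside_rectangle : List (List (List Int)) × ((Int × Int) × (Int × Int)) × Int :=
  ([[[3, 4]], [[0, 9]]], ((0, 0), (10, 10)), 1)

def Spec_is_board_inside_rectangle (board_corners : List (List (List Int))) (rectangle : (Int × Int) × (Int × Int)) (tolerance : Int) (out : Bool) : Prop := out = is_board_inside_rectangle_alt board_corners rectangle tolerance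
instance (board_corners : List (List (List Int))) (rectangle : (Int × Int) × (Int × Int)) (tolerance : Int) (out : Bool) : Decidable (Spec_is_board_inside_rectangle board_corners rectangle tolerance out) := by unfold Spec_is_board_inside_rectangle; infer_instance

-- ===== CLAIM (what is proved, stated in full; the proofs are below) =====
def Claim_equal_is_board_inside_rectangle : Prop := ∀ (board_corners : List (List (List Int))) (rectangle : (Int × Int) × (Int × Int)) (tolerance : Int), Dom_is_board_inside_rectangle board_corners rectangle tolerance → Pre_is_board_inside_rectangle board_corners rectangle tolerance → Spec_is_board_inside_rectangle board_corners rectangle tolerance (is_board_inside_rectangle board_corners rectangle tolerance)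

-- ===== LEMMAS AND PROOFS =====

-- A's early-exit loop is the conjunction over all corners
theorem pvA_loop_eq_all (x1 y1 x2 y2 tol : Int) (bc : List (List (List Int))) :
    pvA_loop x1 y1 x2 y2 tol bc
      = bc.all (fun c => decide (x1 - tol ≤ pvCoord c 0 ∧ pvCoord c 0 ≤ x2 + tol ∧
                                 y1 - tol ≤ pvCoord c 1 ∧ pvCoord c 1 ≤ y2 + tol)) := by
  induction bc with
  | nil => rfl
  | cons c rest ih =>
    simp only [pvA_loop, List.all_cons, ih]
    by_cases h : x1 - tol ≤ pvCoord c 0 ∧ pvCoord c 0 ≤ x2 + tol ∧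
                 y1 - tol ≤ pvCoord c 1 ∧ pvCoord c 1 ≤ y2 + tol <;> simp [h]

-- lower bound against the min of a nonempty list ↔ lower bound against every element
theorem le_min_getD_iff (a : Int) (xs : List Int) (h : xs ≠ []) :
    (a ≤ (PySem.List.min? xs (fun v => v)).getD 0) ↔ ∀ v ∈ xs, a ≤ v := by
  rcases hm : PySem.List.min? xs (fun v => v) with _ | m
  · exact absurd ((PySem.List.min?_eq_none_iff _ _).1 hm) h
  · simp only [Option.getD_some]
    constructor
    · intro ham v hv
      exact le_trans ham (PySem.List.min?_isMin hm v hv)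
    · intro hall
      exact hall m (PySem.List.min?_mem hm)

-- upper bound against the max of a nonempty list ↔ upper bound on every element
theorem max_getD_le_iff (a : Int) (xs : List Int) (h : xs ≠ []) :
    ((PySem.List.max? xs (fun v => v)).getD 0 ≤ a) ↔ ∀ v ∈ xs, v ≤ a := by
  rcases hm : PySem.List.max? xs (fun v => v) with _ | m
  · exact absurd ((PySem.List.max?_eq_none_iff _ _).1 hm) h
  · simp only [Option.getD_some]
    constructor
    · intro ham v hv
      exact le_trans (PySem.List.max?_isMax hm v hv) ham
    · intro hall
      exact hall m (PySem.List.max?_mem hm)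

-- ===== VERDICT (by name: the statement is the Claim_ definition above) =====
theorem is_board_inside_rectangle_spec : Claim_equal_is_board_inside_rectangle := by
  intro bc rect tol _ _
  unfold Spec_is_board_inside_rectangle is_board_inside_rectangle is_board_inside_rectangle_alt
  rcases rect with ⟨⟨x1, y1⟩, ⟨x2, y2⟩⟩
  by_cases hbc : bc = []
  · subst hbc; rfl
  · rw [if_neg hbc, pvA_loop_eq_all]
    simp only [show pvCoordB = pvCoord from rfl]
    have hx : bc.map (fun c => pvCoord c 0) ≠ [] := by simpa using hbc
    have hy : bc.map (fun c => pvCoord c 1) ≠ [] := by simpa using hbc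
    rw [Bool.eq_iff_iff]
    simp only [List.all_eq_true, decide_eq_true_eq, Bool.and_eq_true,
      le_min_getD_iff _ _ hx, max_getD_le_iff _ _ hx,
      le_min_getD_iff _ _ hy, max_getD_le_iff _ _ hy, List.forall_mem_map]
    constructor
    · intro h
      exact ⟨⟨⟨fun c hc => (h c hc).1, fun c hc => (h c hc).2.1⟩,
              fun c hc => (h c hc).2.2.1⟩, fun c hc => (h c hc).2.2.2⟩
    · intro ⟨⟨⟨h1, h2⟩, h3⟩, h4⟩ c hc
      exact ⟨h1 c hc, h2 c hc, h3 c hc, h4 c hc⟩
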